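-- pv_equiv track=rewrite | github.com/Gale-Leons/Metalpredator2.0 | lib/utilities.py | get_number_of_gaps
-- ===== SOURCE A (Python) =====
-- def get_number_of_gaps(sequence, ind, gap_type):
--
--     i=0
--     j=0
--     gaps=0
--     while j <= ind:
--         if sequence[i] == gap_type:
--             gaps += 1
--         else:
--             j += 1
--         i += 1
--
--     return gaps
-- ===== SOURCE B (Python) =====
-- def get_number_of_gaps(sequence, ind, gap_type):
--     if ind < 0:
--         return 0
--     positions = [i for i, c in enumerate(sequence) if c != gap_type]
--     return positions[ind] - ind
-- ===== Notes on version B (the rewrite author's own statement) =====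
-- stated objective: simpler
-- what changed: A's stateful while-loop with three counters is replaced by building the list of absolute positions of non-gap characters and returning the closed identity positions[ind] - ind (gaps before the ind-th non-gap char = its absolute index minus the ind non-gap chars before it); negative ind returns 0 as in A.
-- outside the precondition, e.g. on get_number_of_gaps('AB', 5, '-'): A raises IndexError, B raises IndexError
import Mathlib
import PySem

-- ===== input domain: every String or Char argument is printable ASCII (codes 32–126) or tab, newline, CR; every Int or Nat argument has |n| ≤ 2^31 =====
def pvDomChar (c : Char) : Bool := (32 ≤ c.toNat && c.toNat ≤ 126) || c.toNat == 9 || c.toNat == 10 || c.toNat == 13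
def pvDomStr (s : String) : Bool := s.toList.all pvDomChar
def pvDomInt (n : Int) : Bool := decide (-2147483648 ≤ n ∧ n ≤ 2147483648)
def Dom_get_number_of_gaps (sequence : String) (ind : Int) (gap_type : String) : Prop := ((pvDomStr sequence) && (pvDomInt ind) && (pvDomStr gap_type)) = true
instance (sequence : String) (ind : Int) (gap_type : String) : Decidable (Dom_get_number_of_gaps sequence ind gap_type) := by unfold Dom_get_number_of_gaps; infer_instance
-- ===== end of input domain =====

-- B replaces A's stateful while-loop (two counters) by the closed identity
-- "gaps before the ind-th non-gap char = absolute position of that char - ind"; objective: simpler.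

-- ===== PORT A =====
-- A's while-loop: i advances through the string one char per iteration, so it is a
-- structural recursion on the remaining character list; j and gaps are the loop state.
-- Python raises IndexError when the scan runs off the end; Pre_ excludes those inputs.
def get_number_of_gaps_loop (cs : List Char) (j gaps ind : Int) (gap_type : String) : Int :=
  if j ≤ ind then
    match cs with
    | [] => gaps  -- Python: IndexError here; such inputs are outside Pre_
    | c :: rest =>
      if [c] = gap_type.toList then get_number_of_gaps_loop rest j (gaps + 1) ind gap_type
      else get_number_of_gaps_loop rest (j + 1) gaps ind gap_type
  else gaps

def get_number_of_gaps (sequence : String) (ind : Int) (gap_type : String) : Int :=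
  get_number_of_gaps_loop sequence.toList 0 0 ind gap_type

-- ===== PORT B =====
def get_number_of_gaps_alt (sequence : String) (ind : Int) (gap_type : String) : Int :=
  if ind < 0 then 0
  else
    let positions : List Int :=
      ((PySem.List.enumerate sequence.toList 0).filter
        (fun p => decide ([p.2] ≠ gap_type.toList))).map (·.1)
    match PySem.List.pyGet? positions ind with
    | some p => p - ind
    | none => 0  -- Python: IndexError here; such inputs are outside Pre_

-- ===== PRECONDITION & SPEC =====
-- Pre_ excludes exactly the inputs on which A raises IndexError: ind ≥ 0 but the
-- sequence holds at most ind non-gap characters, so A's scan runs off the end.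
def Pre_get_number_of_gaps (sequence : String) (ind : Int) (gap_type : String) : Prop :=
  ind < 0 ∨ ind < (sequence.toList.filter (fun c => decide ([c] ≠ gap_type.toList))).length
instance (sequence : String) (ind : Int) (gap_type : String) : Decidable (Pre_get_number_of_gaps sequence ind gap_type) := by unfold Pre_get_number_of_gaps; infer_instance

def pvWitness_get_number_of_gaps : String × Int × String := ("A--B-C", 2, "-")

def Spec_get_number_of_gaps (sequence : String) (ind : Int) (gap_type : String) (out : Int) : Prop := out = get_number_of_gaps_alt sequence ind gap_type
instance (sequence : String) (ind : Int) (gap_type : String) (out : Int) : Decidable (Spec_get_number_of_gaps sequence ind gap_type out) := by unfold Spec_get_number_of_gaps; infer_instance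

-- ===== CLAIM (what is proved, stated in full; the proofs are below) =====
def Claim_equal_get_number_of_gaps : Prop := ∀ (sequence : String) (ind : Int) (gap_type : String), Dom_get_number_of_gaps sequence ind gap_type → Pre_get_number_of_gaps sequence ind gap_type → Spec_get_number_of_gaps sequence ind gap_type (get_number_of_gaps sequence ind gap_type)

-- ===== LEMMAS AND PROOFS =====

-- Recursive characterisation of the list of absolute positions of non-gap chars.
def pvPositions (cs : List Char) (gap_type : String) : List Int :=
  match cs with
  | [] => []
  | c :: rest =>
    if [c] = gap_type.toList then (pvPositions rest gap_type).map (· + 1)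
    else 0 :: (pvPositions rest gap_type).map (· + 1)

theorem pvPositions_length (cs : List Char) (gap_type : String) :
    (pvPositions cs gap_type).length
      = (cs.filter (fun c => decide ([c] ≠ gap_type.toList))).length := by
  induction cs with
  | nil => rfl
  | cons c rest ih =>
    simp only [pvPositions, List.filter_cons]
    by_cases h : [c] = gap_type.toList <;> simp [h, ih]

-- B's enumerate/filter/map pipeline computes pvPositions shifted by the start offset.
theorem enumerate_positions (cs : List Char) (gap_type : String) (s : Int) :
    ((PySem.List.enumerate cs s).filter
        (fun p => decide ([p.2] ≠ gap_type.toList))).map (·.1)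
      = (pvPositions cs gap_type).map (· + s) := by
  induction cs generalizing s with
  | nil => rfl
  | cons c rest ih =>
    rw [PySem.List.enumerate_cons, List.filter_cons, pvPositions]
    by_cases h : [c] = gap_type.toList
    · rw [if_neg (by simp [h]), if_pos h, ih, List.map_map]
      apply List.map_congr_left
      intro a _
      simp
      omega
    · rw [if_pos (by simp [h]), if_neg h, List.map_cons, List.map_cons, ih, List.map_map]
      refine congrArg₂ List.cons (by simp) ?_
      apply List.map_congr_left
      intro a _
      simp
      omega

-- Loop invariant: with k = ind - j non-gap chars still to pass, the loop returns
-- gaps + (position of the k-th non-gap char of cs) - k.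
theorem loop_eq (cs : List Char) (gap_type : String) :
    ∀ (j gaps ind : Int) (k : Nat) (p : Int), j ≤ ind → ind - j = (k : Int) →
      (pvPositions cs gap_type)[k]? = some p →
      get_number_of_gaps_loop cs j gaps ind gap_type = gaps + p - (k : Int) := by
  induction cs with
  | nil => intro j gaps ind k p _ _ hg; simp [pvPositions] at hg
  | cons c rest ih =>
    intro j gaps ind k p hj hk hg
    rw [get_number_of_gaps_loop.eq_def, if_pos hj]
    show (if [c] = gap_type.toList then get_number_of_gaps_loop rest j (gaps + 1) ind gap_type
      else get_number_of_gaps_loop rest (j + 1) gaps ind gap_type) = gaps + p - (k : Int)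
    by_cases h : [c] = gap_type.toList
    · rw [if_pos h]
      rw [pvPositions, if_pos h, List.getElem?_map] at hg
      rcases Option.map_eq_some_iff.mp hg with ⟨q, hq, hpq⟩
      rw [ih j (gaps + 1) ind k q hj hk hq]
      omega
    · rw [if_neg h]
      rw [pvPositions, if_neg h] at hg
      cases k with
      | zero =>
        simp at hg
        rw [get_number_of_gaps_loop.eq_def, if_neg (by omega)]
        omega
      | succ k' =>
        rw [List.getElem?_cons_succ, List.getElem?_map] at hg
        rcases Option.map_eq_some_iff.mp hg with ⟨q, hq, hpq⟩
        rw [ih (j + 1) gaps ind k' q (by omega) (by push_cast at hk ⊢; omega) hq]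
        push_cast
        omega

-- ===== VERDICT (by name: the statement is the Claim_ definition above) =====
theorem get_number_of_gaps_spec : Claim_equal_get_number_of_gaps := by
  intro sequence ind gap_type _ hpre
  unfold Spec_get_number_of_gaps get_number_of_gaps get_number_of_gaps_alt
  by_cases hneg : ind < 0
  · rw [if_pos hneg, get_number_of_gaps_loop.eq_def, if_neg (by omega)]
  · rw [if_neg hneg]
    have hlen : ind.toNat < (pvPositions sequence.toList gap_type).length := by
      rw [pvPositions_length]
      rcases hpre with h | h
      · omega
      · omega
    obtain ⟨p, hp⟩ : ∃ p, (pvPositions sequence.toList gap_type)[ind.toNat]? = some p :=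
      ⟨_, List.getElem?_eq_getElem hlen⟩
    have hmap : List.map (fun x => x + (0 : Int)) (pvPositions sequence.toList gap_type)
        = pvPositions sequence.toList gap_type := by simp
    have hB : PySem.List.pyGet?
        (((PySem.List.enumerate sequence.toList 0).filter
          (fun q => decide ([q.2] ≠ gap_type.toList))).map (·.1)) ind = some p := by
      rw [enumerate_positions, hmap, PySem.List.pyGet?_of_nonneg _ (show (0:Int) ≤ ind by omega)]
      exact hp
    simp only [hB]
    rw [loop_eq sequence.toList gap_type 0 0 ind ind.toNat p (by omega) (by omega) hp]
    omega
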